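-- pv_equiv track=rewrite | github.com/LoisBN/python | env/TME.py | nb_couples_divise
-- ===== SOURCE A (Python) =====
-- def nb_couples_divise(n,p):
--     """
--     int+int->int\n
--     hypothèse : n ≤ p\n
--     retourn le nombre de couples entiers (i,j) dans l'intervalle [n,p] tels que i divise j"""
--     compteur = 0
--     i = n
--     j = p
--     while j>n:
--         while True:
--             if i==p:
--                 i = n
--                 break
--             if (i!=0 and j!=i and j%i == 0):
--                 compteur = compteur +1
--             i = i+1
--         j = j-1
--     return compteur
-- ===== SOURCE B (Python) =====
-- def nb_couples_divise(n, p):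
--     # One pass over i in [n, p): count multiples of i in (n, p] by floor division.
--     total = 0
--     for i in range(n, p):
--         if i == 0:
--             continue
--         a = abs(i)
--         total += p // a - n // a
--         if i > n:
--             total -= 1
--     return total
-- ===== Notes on version B (the rewrite author's own statement) =====
-- stated objective: alternative
-- what changed: Replaces A's nested scan over all pairs (i,j) by a single pass over i that counts the multiples of i in (n, p] directly as p // |i| - n // |i|, subtracting 1 for the excluded pair j = i.
import Mathlib
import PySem

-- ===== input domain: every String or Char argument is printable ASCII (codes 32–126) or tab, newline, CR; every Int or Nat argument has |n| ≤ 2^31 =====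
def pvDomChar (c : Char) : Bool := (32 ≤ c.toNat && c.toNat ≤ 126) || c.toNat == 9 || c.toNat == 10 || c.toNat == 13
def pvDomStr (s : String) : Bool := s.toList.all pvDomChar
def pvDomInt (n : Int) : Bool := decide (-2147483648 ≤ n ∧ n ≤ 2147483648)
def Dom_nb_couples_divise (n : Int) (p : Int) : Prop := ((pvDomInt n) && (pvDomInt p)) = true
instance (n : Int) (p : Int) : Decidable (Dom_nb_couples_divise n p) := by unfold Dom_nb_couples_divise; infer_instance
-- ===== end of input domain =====

-- B replaces A's nested scan over all pairs (i, j) by a single pass over i that counts the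
-- multiples of i in (n, p] with two floor divisions (objective: alternative).


-- ===== PORT A =====
-- inner 'while True' loop: i counts up, resets to n and breaks at i == p.
-- The Nat fuel is only a totality guard: it is (p - i).toNat + 1 at the call site,
-- enough for the loop to reach its own break (i starts at n ≤ p there).
def pvInnerA (n p j : Int) : Nat → Int → Int → Int × Int
  | 0, i, compteur => (i, compteur)
  | fuel+1, i, compteur =>
    if i = p then (n, compteur)
    else pvInnerA n p j fuel (i + 1)
      (if i ≠ 0 ∧ j ≠ i ∧ PySem.Int.mod j i = 0 then compteur + 1 else compteur)

-- outer 'while j > n' loop: j counts down from p; fuel (p - n).toNat is exact.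
def pvOuterA (n p : Int) : Nat → Int → Int → Int → Int
  | 0, _, _, compteur => compteur
  | fuel+1, j, i, compteur =>
    if j > n then
      let r := pvInnerA n p j ((p - i).toNat + 1) i compteur
      pvOuterA n p fuel (j - 1) r.1 r.2
    else compteur

def nb_couples_divise (n : Int) (p : Int) : Int :=
  pvOuterA n p (p - n).toNat p n 0

-- ===== PORT B =====
-- one pass: for each i in range(n, p) with i ≠ 0, the multiples of i in (n, p]
-- number p // |i| - n // |i|; subtract 1 for the pair j = i when i > n.
def nb_couples_divise_alt (n : Int) (p : Int) : Int :=
  (PySem.List.pyRange n p 1).foldl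
    (fun total i =>
      if i = 0 then total
      else
        let a := |i|
        let total := total + (PySem.Int.floordiv p a - PySem.Int.floordiv n a)
        if i > n then total - 1 else total)
    0

-- ===== PRECONDITION & SPEC =====
def Spec_nb_couples_divise (n : Int) (p : Int) (out : Int) : Prop := out = nb_couples_divise_alt n p
instance (n : Int) (p : Int) (out : Int) : Decidable (Spec_nb_couples_divise n p out) := by unfold Spec_nb_couples_divise; infer_instance

-- ===== CLAIM (what is proved, stated in full; the proofs are below) =====
def Claim_equal_nb_couples_divise : Prop := ∀ (n : Int) (p : Int), Dom_nb_couples_divise n p → Spec_nb_couples_divise n p (nb_couples_divise n p)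

-- ===== LEMMAS AND PROOFS =====

-- the per-pair indicator of A's inner test
def pvInd (j i : Int) : Int :=
  if i ≠ 0 ∧ j ≠ i ∧ PySem.Int.mod j i = 0 then 1 else 0

-- B's per-i summand
def pvG (n p i : Int) : Int :=
  if i = 0 then 0
  else (PySem.Int.floordiv p |i| - PySem.Int.floordiv n |i|) - (if i > n then 1 else 0)

lemma pvIco_step {a b : Int} (h : a < b) (f : Int → Int) :
    ∑ i ∈ Finset.Ico a b, f i = f a + ∑ i ∈ Finset.Ico (a+1) b, f i := by
  rw [Finset.Ico_add_one_left_eq_Ioo, ← Finset.Ioo_insert_left h,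
    Finset.sum_insert (by simp)]

lemma pvIoc_step {a b : Int} (h : a < b) (f : Int → Int) :
    ∑ j ∈ Finset.Ioc a b, f j = f b + ∑ j ∈ Finset.Ioc a (b-1), f j := by
  have h1 : Finset.Ioc a b = insert b (Finset.Ioc a (b-1)) := by
    rw [← Finset.Ioo_add_one_right_eq_Ioc a (b-1)]
    have hb : b - 1 + 1 = b := by ring
    rw [hb, Finset.Ioo_insert_right h]
  rw [h1, Finset.sum_insert (by simp)]

lemma pvInnerA_eq (n p j : Int) : ∀ (fuel : Nat) (i c : Int), i ≤ p → (p - i).toNat < fuel →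
    pvInnerA n p j fuel i c = (n, c + ∑ k ∈ Finset.Ico i p, pvInd j k) := by
  intro fuel
  induction fuel with
  | zero => intro i c _ h; omega
  | succ fuel ih =>
    intro i c hip hf
    by_cases hi : i = p
    · subst hi
      simp [pvInnerA]
    · have hlt : i < p := lt_of_le_of_ne hip hi
      rw [pvInnerA, if_neg hi, ih (i+1) _ (by omega) (by omega), pvIco_step hlt]
      have hacc : (if i ≠ 0 ∧ j ≠ i ∧ PySem.Int.mod j i = 0 then c + 1 else c)
          = c + pvInd j i := by unfold pvInd; split_ifs <;> ring
      rw [hacc]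
      ring_nf

lemma pvOuterA_eq (n p : Int) (hnp : n ≤ p) : ∀ (fuel : Nat) (j c : Int), j ≤ p → (j - n).toNat ≤ fuel →
    pvOuterA n p fuel j n c = c + ∑ j' ∈ Finset.Ioc n j, ∑ k ∈ Finset.Ico n p, pvInd j' k := by
  intro fuel
  induction fuel with
  | zero =>
    intro j c hj hf
    rw [pvOuterA, Finset.Ioc_eq_empty_of_le (by omega)]
    simp
  | succ fuel ih =>
    intro j c hj hf
    by_cases hjn : j > n
    · rw [pvOuterA, if_pos hjn,
        pvInnerA_eq n p j ((p - n).toNat + 1) n c hnp (by omega)]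
      rw [ih (j-1) _ (by omega) (by omega), pvIoc_step hjn]
      ring
    · rw [pvOuterA, if_neg hjn, Finset.Ioc_eq_empty_of_le (by omega)]
      simp

lemma pvA_eq_sum (n p : Int) :
    nb_couples_divise n p = ∑ j ∈ Finset.Ioc n p, ∑ k ∈ Finset.Ico n p, pvInd j k := by
  by_cases hnp : n ≤ p
  · unfold nb_couples_divise
    rw [pvOuterA_eq n p hnp (p - n).toNat p 0 le_rfl (by omega)]
    ring
  · unfold nb_couples_divise
    rw [Finset.Ioc_eq_empty_of_le (by omega)]
    have h0 : (p - n).toNat = 0 := by omega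
    rw [h0, pvOuterA]
    simp

lemma pvFoldl_sum (f : Int → Int) (b : Int) : ∀ (k : Nat) (a c : Int), a ≤ b → (b - a).toNat = k →
    (PySem.List.pyRange a b 1).foldl (fun t i => t + f i) c = c + ∑ i ∈ Finset.Ico a b, f i := by
  intro k
  induction k with
  | zero =>
    intro a c h1 h2
    have hab : a = b := by omega
    subst hab
    rw [PySem.List.pyRange_one_eq_nil le_rfl]
    simp
  | succ k ih =>
    intro a c h1 h2
    have hlt : a < b := by omega
    rw [PySem.List.pyRange_one_cons hlt, List.foldl_cons,
      ih (a+1) (c + f a) (by omega) (by omega), pvIco_step hlt f]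
    ring

lemma pvB_eq_sum (n p : Int) :
    nb_couples_divise_alt n p = ∑ i ∈ Finset.Ico n p, pvG n p i := by
  unfold nb_couples_divise_alt
  have hfun : (fun (total i : Int) =>
      if i = 0 then total
      else
        let a := |i|
        let total := total + (PySem.Int.floordiv p a - PySem.Int.floordiv n a)
        if i > n then total - 1 else total) = fun t i => t + pvG n p i := by
    funext t i
    unfold pvG
    by_cases h0 : i = 0
    · simp [h0]
    · by_cases hn : i > n <;> simp [h0, hn] <;> ring
  rw [hfun]
  by_cases hnp : n ≤ p
  · rw [pvFoldl_sum (pvG n p) p (p - n).toNat n 0 hnp rfl]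
    ring
  · rw [PySem.List.pyRange_one_eq_nil (by omega), Finset.Ico_eq_empty_of_le (by omega)]
    simp

-- floor division steps by exactly 1 exactly when the divisor divides the new endpoint
lemma pvFd_step {a : Int} (ha : 0 < a) (p : Int) :
    PySem.Int.floordiv p a = PySem.Int.floordiv (p-1) a + (if a ∣ p then 1 else 0) := by
  have hq : PySem.Int.floordiv (p-1) a * a ≤ p - 1 ∧ p - 1 < (PySem.Int.floordiv (p-1) a + 1) * a :=
    (PySem.Int.floordiv_eq_iff_of_pos ha).mp rfl
  set q := PySem.Int.floordiv (p-1) a with hqd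
  by_cases hd : a ∣ p
  · obtain ⟨k, hk⟩ := hd
    have hqa : q * a < k * a := by nlinarith [hq.1]
    have hqk : q < k := lt_of_mul_lt_mul_right hqa (le_of_lt ha)
    have h1 : (q + 1) * a ≤ p := by nlinarith [mul_nonneg (by omega : (0:Int) ≤ k - (q+1)) (le_of_lt ha)]
    have h2 : p < (q + 1 + 1) * a := by nlinarith [hq.2]
    have hres : PySem.Int.floordiv p a = q + 1 :=
      (PySem.Int.floordiv_eq_iff_of_pos ha).mpr ⟨h1, h2⟩
    rw [hres, if_pos ⟨k, hk⟩]
  · have hne : p ≠ (q + 1) * a := by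
      intro h
      exact hd ⟨q + 1, by linarith [h, mul_comm (q+1) a]⟩
    have h2 : p < (q + 1) * a := lt_of_le_of_ne (by omega) hne
    have hres : PySem.Int.floordiv p a = q :=
      (PySem.Int.floordiv_eq_iff_of_pos ha).mpr ⟨by omega, h2⟩
    rw [hres, if_neg hd]
    ring

lemma pvCount_multiples {a : Int} (ha : 0 < a) (m : Int) : ∀ (p : Int), m ≤ p →
    ∑ j ∈ Finset.Ioc m p, (if a ∣ j then (1:Int) else 0)
      = PySem.Int.floordiv p a - PySem.Int.floordiv m a := by
  have key : ∀ (k : Nat) (p : Int), m ≤ p → (p - m).toNat = k →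
      ∑ j ∈ Finset.Ioc m p, (if a ∣ j then (1:Int) else 0)
        = PySem.Int.floordiv p a - PySem.Int.floordiv m a := by
    intro k
    induction k with
    | zero =>
      intro p h1 h2
      have hpm : p = m := by omega
      subst hpm
      simp
    | succ k ih =>
      intro p h1 h2
      have hlt : m < p := by omega
      rw [pvIoc_step hlt, ih (p-1) (by omega) (by omega), pvFd_step ha p]
      ring
  intro p h
  exact key (p - m).toNat p h rfl

lemma pvG_eq_sum (n p i : Int) (hi : i ∈ Finset.Ico n p) :
    pvG n p i = ∑ j ∈ Finset.Ioc n p, pvInd j i := by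
  rw [Finset.mem_Ico] at hi
  by_cases hi0 : i = 0
  · subst hi0
    unfold pvG pvInd
    simp
  · have ha : 0 < |i| := abs_pos.mpr hi0
    have hsplit : ∀ j, pvInd j i
        = (if |i| ∣ j then (1:Int) else 0) - (if j = i then 1 else 0) := by
      intro j
      unfold pvInd
      by_cases hji : j = i
      · subst hji
        simp [hi0, (abs_dvd i i).mpr dvd_rfl]
      · by_cases hdvd : i ∣ j
        · simp [hi0, hji, PySem.Int.mod_eq_zero_iff_dvd, hdvd, (abs_dvd i j).mpr hdvd]
        · have : ¬ |i| ∣ j := fun h => hdvd ((abs_dvd i j).mp h)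
          simp [hi0, hji, PySem.Int.mod_eq_zero_iff_dvd, hdvd, this]
    simp only [hsplit]
    rw [Finset.sum_sub_distrib,
      pvCount_multiples ha n p (by omega),
      Finset.sum_ite_eq' (Finset.Ioc n p) i (fun _ => (1:Int))]
    unfold pvG
    rw [if_neg hi0]
    simp only [Finset.mem_Ioc, show (n < i ∧ i ≤ p) ↔ i > n from by omega]

-- ===== VERDICT (by name: the statement is the Claim_ definition above) =====
theorem nb_couples_divise_spec : Claim_equal_nb_couples_divise := by
  intro n p _
  unfold Spec_nb_couples_divise
  rw [pvA_eq_sum, pvB_eq_sum, Finset.sum_comm]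
  exact Finset.sum_congr rfl (fun i hi => ((pvG_eq_sum n p i hi).symm))
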